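-- pv_equiv track=rewrite | github.com/douzo/waexpense | backend/app/services/currency.py | _infer_currency_from_wa_id
-- ===== SOURCE A (Python) =====
-- from typing import Optional
--
-- _COUNTRY_CURRENCY_PREFIX = [
--     ("971", "AED"),
--     ("966", "SAR"),
--     ("65", "SGD"),
--     ("62", "IDR"),
--     ("63", "PHP"),
--     ("61", "AUD"),
--     ("91", "INR"),
--     ("81", "JPY"),
--     ("86", "CNY"),
--     ("55", "BRL"),
--     ("49", "EUR"),
--     ("44", "GBP"),
--     ("39", "EUR"),
--     ("34", "EUR"),
--     ("33", "EUR"),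
--     ("1", "USD"),
-- ]
--
-- def _infer_currency_from_wa_id(wa_id: Optional[str]) -> Optional[str]:
--     if not wa_id:
--         return None
--     digits = "".join(ch for ch in wa_id if ch.isdigit())
--     if not digits:
--         return None
--     for prefix, currency in _COUNTRY_CURRENCY_PREFIX:
--         if digits.startswith(prefix):
--             return currency
--     return None
-- ===== SOURCE B (Python) =====
-- from typing import Optional
--
--
-- def _first_digits(wa_id, limit):
--     """One pass over the string, stopping as soon as `limit` digits are seen."""
--     head = []
--     for ch in wa_id:
--         if ch.isdigit():
--             head.append(ch)
--             if len(head) == limit: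
--                 break
--     return head
--
--
-- def _currency_from_head(head):
--     """Hand-rolled decision tree on at most the first three digits."""
--     d0 = head[0]
--     if d0 == '1':
--         return "USD"
--     if len(head) < 2:
--         return None
--     d1 = head[1]
--     if d0 == '9':
--         if d1 == '1':
--             return "INR"
--         if len(head) < 3:
--             return None
--         d2 = head[2]
--         if d1 == '7' and d2 == '1':
--             return "AED"
--         if d1 == '6' and d2 == '6':
--             return "SAR"
--         return None
--     if d0 == '6':
--         return {'5': "SGD", '2': "IDR", '3': "PHP", '1': "AUD"}.get(d1)
--     if d0 == '8':
--         return {'1': "JPY", '6': "CNY"}.get(d1)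
--     if d0 == '5':
--         return "BRL" if d1 == '5' else None
--     if d0 == '4':
--         return {'9': "EUR", '4': "GBP"}.get(d1)
--     if d0 == '3':
--         return "EUR" if d1 in ('9', '4', '3') else None
--     return None
--
--
-- def _infer_currency_from_wa_id(wa_id: Optional[str]) -> Optional[str]:
--     if not wa_id:
--         return None
--     head = _first_digits(wa_id, 3)
--     if not head:
--         return None
--     return _currency_from_head(head)
-- ===== Notes on version B (the rewrite author's own statement) =====
-- stated objective: alternative
-- what changed: Replaces the filter-all-digits-then-scan-the-prefix-table loop with a single early-exit pass that collects at most the first three digits and a hand-rolled decision tree on those digits (no prefix table at all).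
import Mathlib
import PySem

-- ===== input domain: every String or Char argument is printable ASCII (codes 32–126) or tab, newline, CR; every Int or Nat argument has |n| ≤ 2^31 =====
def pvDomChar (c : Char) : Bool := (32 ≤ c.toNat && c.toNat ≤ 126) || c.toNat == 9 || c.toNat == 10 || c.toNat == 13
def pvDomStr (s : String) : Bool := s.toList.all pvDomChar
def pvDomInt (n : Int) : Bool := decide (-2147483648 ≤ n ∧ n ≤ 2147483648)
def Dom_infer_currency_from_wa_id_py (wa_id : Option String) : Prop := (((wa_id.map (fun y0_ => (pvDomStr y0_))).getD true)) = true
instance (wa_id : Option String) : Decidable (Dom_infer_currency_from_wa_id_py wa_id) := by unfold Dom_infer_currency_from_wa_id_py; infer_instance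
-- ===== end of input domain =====

-- B drops the prefix table entirely: one early-exit pass collects at most the first
-- three digits, and a hand-rolled decision tree on those digits picks the currency; same value.

-- ===== PORT A =====
-- the module constant _COUNTRY_CURRENCY_PREFIX (prefixes as char lists)
def pvTableA : List (List Char × String) :=
  [(['9','7','1'], "AED"), (['9','6','6'], "SAR"),
   (['6','5'], "SGD"), (['6','2'], "IDR"), (['6','3'], "PHP"), (['6','1'], "AUD"),
   (['9','1'], "INR"), (['8','1'], "JPY"), (['8','6'], "CNY"), (['5','5'], "BRL"),
   (['4','9'], "EUR"), (['4','4'], "GBP"), (['3','9'], "EUR"), (['3','4'], "EUR"),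
   (['3','3'], "EUR"), (['1'], "USD")]

-- 'for prefix, currency in _COUNTRY_CURRENCY_PREFIX: if digits.startswith(prefix): return currency'
def pvLoopA : List (List Char × String) → List Char → Option String
  | [], _ => none
  | (p, cur) :: rest, d => if PySem.Chars.startswith d p then some cur else pvLoopA rest d

def infer_currency_from_wa_id_py (wa_id : Option String) : Option String :=
  match wa_id with
  | none => none
  | some s =>
    if s.toList = [] then none          -- 'if not wa_id'
    else
      let digits := s.toList.filter PySem.Chars.isdigit   -- ''.join(ch for ch in wa_id if ch.isdigit())
      if digits = [] then none          -- 'if not digits'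
      else pvLoopA pvTableA digits

-- ===== PORT B =====
-- '_first_digits': one pass over the string, stopping as soon as 3 digits are seen
def pvFirstDigits : List Char → List Char → List Char
  | [], acc => acc
  | c :: rest, acc =>
    if PySem.Chars.isdigit c then
      if (acc ++ [c]).length = 3 then acc ++ [c] else pvFirstDigits rest (acc ++ [c])
    else pvFirstDigits rest acc

-- '_currency_from_head': hand-rolled decision tree on at most the first three digits
def pvCurrencyFromHead : List Char → Option String
  | [] => none
  | d0 :: t =>
    if d0 = '1' then some "USD"
    else match t with
    | [] => none
    | d1 :: t2 =>
      if d0 = '9' then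
        if d1 = '1' then some "INR"
        else match t2 with
        | [] => none
        | d2 :: _ =>
          if d1 = '7' ∧ d2 = '1' then some "AED"
          else if d1 = '6' ∧ d2 = '6' then some "SAR"
          else none
      else if d0 = '6' then
        (PySem.Dict.ofList [('5', "SGD"), ('2', "IDR"), ('3', "PHP"), ('1', "AUD")]).get? d1
      else if d0 = '8' then
        (PySem.Dict.ofList [('1', "JPY"), ('6', "CNY")]).get? d1
      else if d0 = '5' then
        if d1 = '5' then some "BRL" else none
      else if d0 = '4' then
        (PySem.Dict.ofList [('9', "EUR"), ('4', "GBP")]).get? d1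
      else if d0 = '3' then
        if d1 = '9' ∨ d1 = '4' ∨ d1 = '3' then some "EUR" else none
      else none

def infer_currency_from_wa_id_py_alt (wa_id : Option String) : Option String :=
  match wa_id with
  | none => none
  | some s =>
    if s.toList = [] then none          -- 'if not wa_id'
    else
      let head := pvFirstDigits s.toList []
      if head = [] then none            -- 'if not head'
      else pvCurrencyFromHead head

-- ===== PRECONDITION & SPEC =====
def Spec_infer_currency_from_wa_id_py (wa_id : Option String) (out : Option String) : Prop := out = infer_currency_from_wa_id_py_alt wa_id
instance (wa_id : Option String) (out : Option String) : Decidable (Spec_infer_currency_from_wa_id_py wa_id out) := by unfold Spec_infer_currency_from_wa_id_py; infer_instance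

-- ===== CLAIM (what is proved, stated in full; the proofs are below) =====
def Claim_equal_infer_currency_from_wa_id_py : Prop := ∀ (wa_id : Option String), Dom_infer_currency_from_wa_id_py wa_id → Spec_infer_currency_from_wa_id_py wa_id (infer_currency_from_wa_id_py wa_id)

-- ===== LEMMAS AND PROOFS =====

-- the ten decimal digit characters: every char the filter keeps is one of them
def pvDigits : List Char := ['0','1','2','3','4','5','6','7','8','9']

-- every digit string of length ≤ 3 — both algorithms only read the first 3 digits
def pvHeads : List (List Char) :=
  [[]] ++ pvDigits.map (fun a => [a])
    ++ pvDigits.flatMap (fun a => pvDigits.map (fun b => [a, b]))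
    ++ pvDigits.flatMap (fun a => pvDigits.flatMap (fun b => pvDigits.map (fun c => [a, b, c])))

-- A's scan and B's decision tree agree on every ≤3-char digit head (kernel enumeration, 1111 heads)
set_option maxRecDepth 40000 in
theorem pv_all_heads :
    pvHeads.all (fun t => pvLoopA pvTableA t == pvCurrencyFromHead t) = true := by decide

-- A's scan reads only the first 3 chars (every table prefix has length ≤ 3)
theorem pvA_take (d : List Char) : pvLoopA pvTableA d = pvLoopA pvTableA (d.take 3) := by
  rcases d with _ | ⟨a, _ | ⟨b, _ | ⟨c, rest⟩⟩⟩ <;> rfl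

-- B's collector returns exactly the first 3 digits of the string
theorem pvCollect_eq (s : List Char) (acc : List Char) (h : acc.length < 3) :
    pvFirstDigits s acc = (acc ++ s.filter PySem.Chars.isdigit).take 3 := by
  induction s generalizing acc with
  | nil => simp [pvFirstDigits, List.take_of_length_le (le_of_lt h)]
  | cons c rest ih =>
    by_cases hc : PySem.Chars.isdigit c = true
    · simp only [pvFirstDigits, hc, if_pos]
      by_cases h3 : (acc ++ [c]).length = 3
      · rw [if_pos h3, List.filter_cons_of_pos hc]
        have : acc ++ c :: rest.filter PySem.Chars.isdigit
            = (acc ++ [c]) ++ rest.filter PySem.Chars.isdigit := by simp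
        rw [this, List.take_append_of_le_length (by omega), List.take_of_length_le (by omega)]
      · rw [if_neg h3, ih (acc ++ [c]) (by simp at h3 ⊢; omega),
          List.filter_cons_of_pos hc]
        simp
    · simp only [pvFirstDigits, hc]
      rw [if_neg (by simp), ih acc h, List.filter_cons_of_neg (by simp [hc])]

theorem pv_digit_mem (c : Char) (h : PySem.Chars.isdigit c = true) : c ∈ pvDigits := by
  simp [PySem.Chars.isdigit, Char.le_def, UInt32.le_iff_toNat_le] at h
  have hc : c = Char.ofNat c.toNat := (Char.ofNat_toNat c).symm
  obtain ⟨h1, h2⟩ := h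
  interval_cases hn : c.toNat <;> rw [hc] <;> decide

theorem pv_mem_heads (d : List Char) (h : ∀ c ∈ d, PySem.Chars.isdigit c = true) :
    d.take 3 ∈ pvHeads := by
  have hd : ∀ c ∈ d, c ∈ pvDigits := fun c hc => pv_digit_mem c (h c hc)
  rcases d with _ | ⟨a, _ | ⟨b, _ | ⟨c, rest⟩⟩⟩ <;>
    simp only [List.take_succ_cons, List.take_nil, List.take_zero, pvHeads,
      List.mem_append, List.mem_map, List.mem_flatMap, List.mem_singleton] <;>
    simp_all

-- core: on any digit string the list scan equals the decision tree on its 3-char head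
theorem pvLoop_eq_tree (d : List Char) (h : ∀ c ∈ d, PySem.Chars.isdigit c = true) :
    pvLoopA pvTableA d = pvCurrencyFromHead (d.take 3) := by
  rw [pvA_take]
  exact eq_of_beq (List.all_eq_true.mp pv_all_heads _ (pv_mem_heads d h))

-- ===== VERDICT (by name: the statement is the Claim_ definition above) =====
theorem infer_currency_from_wa_id_py_spec : Claim_equal_infer_currency_from_wa_id_py := by
  intro wa_id _
  unfold Spec_infer_currency_from_wa_id_py infer_currency_from_wa_id_py infer_currency_from_wa_id_py_alt
  cases wa_id with
  | none => rfl
  | some s =>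
    simp only []
    by_cases hs : s.toList = []
    · simp [hs]
    · rw [if_neg hs, if_neg hs]
      rw [pvCollect_eq s.toList [] (by simp), List.nil_append]
      by_cases hf : s.toList.filter PySem.Chars.isdigit = []
      · simp [hf]
      · rw [if_neg hf, if_neg (by simp [List.take_eq_nil_iff, hf])]
        exact pvLoop_eq_tree _ (fun c hc => (List.mem_filter.mp hc).2)
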